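-- pv_equiv track=rewrite | github.com/JNUZXF/llm_translator | backend/utils/agent_tool_find_keyword_context.py | _get_line_header_level
-- ===== SOURCE A (Python) =====
-- def _get_line_header_level(line: str) -> int:
--     """
--     获取行的标题级别
--     """
--     line = line.strip()
--     if line.startswith('#'):
--         level = 0
--         for char in line:
--             if char == '#':
--                 level += 1
--             elif char == ' ':
--                 break
--             else:
--                 return 0
--         return level if level <= 6 else 0
--     return 0
-- ===== SOURCE B (Python) =====
-- def _get_line_header_level(line: str) -> int:
--     """Pattern table: a header line is exactly '#'*level, or '#'*level followed by a space;
--     try each of the six fixed patterns instead of counting characters."""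
--     s = line.strip()
--     for level in (1, 2, 3, 4, 5, 6):
--         prefix = '#' * level
--         if s == prefix or s.startswith(prefix + ' '):
--             return level
--     return 0
-- ===== Notes on version B (the rewrite author's own statement) =====
-- stated objective: alternative
-- what changed: Instead of scanning characters with a counter/break/early-return state machine, B matches the stripped line against the six fixed header patterns ('#'*level alone or followed by a space) and returns the first matching level.
import Mathlib
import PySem

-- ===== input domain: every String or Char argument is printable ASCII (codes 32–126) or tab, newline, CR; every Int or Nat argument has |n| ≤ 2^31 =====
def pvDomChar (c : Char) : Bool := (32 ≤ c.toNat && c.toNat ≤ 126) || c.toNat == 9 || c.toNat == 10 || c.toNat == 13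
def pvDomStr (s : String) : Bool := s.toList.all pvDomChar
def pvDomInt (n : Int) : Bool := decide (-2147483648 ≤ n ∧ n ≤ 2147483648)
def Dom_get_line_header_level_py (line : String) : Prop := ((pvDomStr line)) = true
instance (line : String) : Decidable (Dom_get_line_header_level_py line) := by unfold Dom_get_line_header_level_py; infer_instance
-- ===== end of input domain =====

-- B replaces A's per-character counter/break/early-return state machine by matching the
-- stripped line against the six fixed header patterns '#'*level (alone or followed by a
-- space), returning the first matching level (objective: alternative).


-- ===== PORT A =====
-- the 'for char in line' loop: count hashes, break on a space (then the post-loop cap), return 0 otherwise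
def pvLoopA : List Char → Int → Int
  | [], level => if level ≤ 6 then level else 0
  | c :: rest, level =>
    if c = '#' then pvLoopA rest (level + 1)
    else if c = ' ' then (if level ≤ 6 then level else 0)
    else 0

def get_line_header_level_py (line : String) : Int :=
  let s := PySem.Chars.strip line.toList
  if PySem.Chars.startswith s ['#'] then pvLoopA s 0 else 0

-- ===== PORT B =====
-- the 'for level in (1,…,6)' loop of Source B: try each fixed pattern in turn
def pvTryB (s : List Char) : List Nat → Int
  | [] => 0
  | lv :: rest =>
    let p := List.replicate lv '#'                -- '#' * level
    if s = p ∨ PySem.Chars.startswith s (p ++ [' ']) then (lv : Int)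
    else pvTryB s rest

def get_line_header_level_py_alt (line : String) : Int :=
  pvTryB (PySem.Chars.strip line.toList) [1, 2, 3, 4, 5, 6]

-- ===== PRECONDITION & SPEC =====
def Spec_get_line_header_level_py (line : String) (out : Int) : Prop := out = get_line_header_level_py_alt line
instance (line : String) (out : Int) : Decidable (Spec_get_line_header_level_py line out) := by unfold Spec_get_line_header_level_py; infer_instance

-- ===== CLAIM (what is proved, stated in full; the proofs are below) =====
def Claim_equal_get_line_header_level_py : Prop := ∀ (line : String), Dom_get_line_header_level_py line → Spec_get_line_header_level_py line (get_line_header_level_py line)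

-- ===== LEMMAS AND PROOFS =====

-- tail check shared by both characterisations: after the hash prefix, end-of-string or a space
def pvTail (s : List Char) : Bool :=
  match s.dropWhile (· == '#') with
  | [] => true
  | c :: _ => c == ' '

-- A's loop, characterised by the takeWhile/dropWhile split of its input
theorem pvLoopA_spec (s : List Char) (l : Int) :
    pvLoopA s l =
      (let k : Int := (s.takeWhile (· == '#')).length
       if pvTail s then (if l + k ≤ 6 then l + k else 0) else 0) := by
  induction s generalizing l with
  | nil => simp [pvLoopA, pvTail]
  | cons c rest ih =>
    by_cases hc : c = '#'
    · simp only [pvLoopA, hc, pvTail, List.takeWhile_cons, List.dropWhile_cons,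
        beq_self_eq_true, if_pos]
      rw [ih (l + 1)]
      simp only [pvTail, List.length_cons]
      push_cast
      ring_nf
    · simp only [pvLoopA, pvTail, List.takeWhile_cons, List.dropWhile_cons,
        beq_iff_eq, if_neg hc]
      by_cases hsp : c = ' ' <;> simp [hsp]

theorem startswith_hash_iff (s : List Char) :
    PySem.Chars.startswith s ['#'] = true ↔ 0 < (s.takeWhile (· == '#')).length := by
  rw [PySem.Chars.startswith_iff]
  cases s with
  | nil => simp
  | cons c rest =>
    rw [List.cons_prefix_cons]
    by_cases hc : c = '#'
    · simp [hc]
    · simp [hc, Ne.symm hc]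

-- one pattern check of B, characterised the same way
theorem pvCheck_iff (s : List Char) (lv : Nat) :
    (s = List.replicate lv '#' ∨ PySem.Chars.startswith s (List.replicate lv '#' ++ [' ']) = true)
      ↔ ((s.takeWhile (· == '#')).length = lv ∧ pvTail s = true) := by
  induction lv generalizing s with
  | zero =>
    rw [PySem.Chars.startswith_iff]
    cases s with
    | nil => simp [pvTail]
    | cons c rest =>
      simp only [List.replicate, List.nil_append, List.cons_prefix_cons]
      by_cases hc : c = '#'
      · simp [hc, pvTail]
      · constructor
        · rintro (h | ⟨hsp, -⟩)
          · exact absurd h (by simp)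
          · subst hsp
            simp [pvTail]
        · rintro ⟨hk, ht⟩
          simp only [pvTail, List.dropWhile_cons, beq_iff_eq, if_neg hc] at ht
          exact Or.inr ⟨by simpa using ht.symm, List.nil_prefix⟩
  | succ n ih =>
    cases s with
    | nil =>
      simp only [PySem.Chars.startswith_iff]
      constructor
      · rintro (h | h)
        · exact absurd h (by simp [List.replicate])
        · exact absurd (List.prefix_nil.mp h) (by simp [List.replicate])
      · rintro ⟨hk, -⟩; simp at hk
    | cons c rest =>
      by_cases hc : c = '#'
      · subst hc
        rw [PySem.Chars.startswith_iff] at *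
        simp only [List.replicate_succ, List.cons_append, List.cons_prefix_cons,
          List.cons.injEq, List.takeWhile_cons]
        constructor
        · rintro (⟨-, h⟩ | ⟨-, h⟩)
          · have := (ih rest).mp (Or.inl h)
            simpa [pvTail, List.dropWhile_cons] using ⟨by simp [this.1], this.2⟩
          · have := (ih rest).mp (Or.inr (by rw [PySem.Chars.startswith_iff]; exact h))
            simpa [pvTail, List.dropWhile_cons] using ⟨by simp [this.1], this.2⟩
        · rintro ⟨hk, ht⟩
          simp only [beq_self_eq_true, if_pos, List.length_cons] at hk
          have hrest := (ih rest).mpr ⟨by omega, by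
            simpa [pvTail, List.dropWhile_cons] using ht⟩
          rcases hrest with h | h
          · exact Or.inl ⟨trivial, h⟩
          · exact Or.inr ⟨trivial, by rw [PySem.Chars.startswith_iff] at h; exact h⟩
      · constructor
        · rintro (h | h)
          · rw [List.replicate_succ] at h
            simp only [List.cons.injEq] at h
            exact absurd h.1 hc
          · rw [PySem.Chars.startswith_iff, List.replicate_succ, List.cons_append,
              List.cons_prefix_cons] at h
            exact (hc h.1.symm).elim
        · rintro ⟨hk, -⟩
          simp [hc] at hk
  
-- the core equality on the stripped character list
theorem pvCore (s : List Char) :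
    (if PySem.Chars.startswith s ['#'] then pvLoopA s 0 else 0) = pvTryB s [1, 2, 3, 4, 5, 6] := by
  have hA := pvLoopA_spec s 0
  simp only [zero_add] at hA
  simp only [pvTryB, pvCheck_iff]
  by_cases hsw : PySem.Chars.startswith s ['#'] = true
  · rw [if_pos hsw, hA]
    have hk : 0 < (s.takeWhile (· == '#')).length := (startswith_hash_iff s).mp hsw
    by_cases ht : pvTail s = true
    · simp only [ht, if_pos, and_true]
      generalize (s.takeWhile (· == '#')).length = k at hk ⊢
      split_ifs <;> omega
    · simp [ht]
  · rw [if_neg hsw]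
    have hk : (s.takeWhile (· == '#')).length = 0 := by
      by_contra h
      exact hsw ((startswith_hash_iff s).mpr (by omega))
    simp [hk]

-- ===== VERDICT (by name: the statement is the Claim_ definition above) =====
theorem get_line_header_level_py_spec : Claim_equal_get_line_header_level_py := by
  intro line _
  unfold Spec_get_line_header_level_py get_line_header_level_py get_line_header_level_py_alt
  exact pvCore (PySem.Chars.strip line.toList)
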